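-- pv_equiv track=rewrite | github.com/pypi-data/pypi-mirror-392 | packages/kicad-sch-api/kicad_sch_api-0.5.6-py3-none-any.whl/kicad_sch_api/core/managers/validation.py | _validate_reference_format
-- ===== SOURCE A (Python) =====
-- def _validate_reference_format(reference: str) -> bool:
--     """Validate component reference format."""
--     if not reference:
--         return False
--
--     # Must start with letter(s), followed by numbers
--     if not reference[0].isalpha():
--         return False
--
--     # Find where numbers start
--     alpha_end = 0
--     for i, char in enumerate(reference):
--         if char.isdigit():
--             alpha_end = i
--             break
--     else:
--         return False  # No numbers found
--
--     # Check alpha part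
--     alpha_part = reference[:alpha_end]
--     if not alpha_part.isalpha():
--         return False
--
--     # Check numeric part
--     numeric_part = reference[alpha_end:]
--     if not numeric_part.isdigit():
--         return False
--
--     return True
-- ===== SOURCE B (Python) =====
-- def _validate_reference_format(reference: str) -> bool:
--     """Validate component reference format (single left-to-right pass)."""
--     if not reference:
--         return False
--     if not reference[0].isalpha():
--         return False
--     seen_digit = False
--     for char in reference:
--         if char.isdigit():
--             seen_digit = True
--         elif char.isalpha():
--             if seen_digit:
--                 return False
--         else:
--             return False
--     return seen_digit
-- ===== Notes on version B (the rewrite author's own statement) =====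
-- stated objective: simpler
-- what changed: Replaces find-first-digit-index + two slices + per-slice isalpha/isdigit revalidation with one left-to-right pass maintaining a seen_digit flag.
import Mathlib
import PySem

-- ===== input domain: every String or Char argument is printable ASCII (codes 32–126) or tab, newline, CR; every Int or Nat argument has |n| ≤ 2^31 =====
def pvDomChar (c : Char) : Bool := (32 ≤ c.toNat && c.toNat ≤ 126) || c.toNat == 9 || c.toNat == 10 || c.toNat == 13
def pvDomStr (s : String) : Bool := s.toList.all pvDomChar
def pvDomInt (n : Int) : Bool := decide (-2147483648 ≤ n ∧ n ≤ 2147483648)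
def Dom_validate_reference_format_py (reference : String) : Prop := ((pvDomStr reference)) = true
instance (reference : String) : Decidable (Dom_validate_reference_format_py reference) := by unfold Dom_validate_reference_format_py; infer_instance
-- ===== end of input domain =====

-- B replaces A's find-boundary/slice/revalidate scheme with a single pass and a seen_digit flag (objective: simpler).

-- ===== PORT A =====
-- the enumerate-with-break loop: index of the first digit, none if there is no digit
def pvFindFirstDigit : List Char → Option Nat
  | [] => none
  | c :: rest =>
    if PySem.Chars.isdigit c then some 0
    else (pvFindFirstDigit rest).map (· + 1)

def validate_reference_format_py (reference : String) : Bool :=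
  match reference.toList with
  | [] => false              -- if not reference: return False
  | c0 :: _ =>
    if !PySem.Chars.isalpha c0 then false
    else
      match pvFindFirstDigit reference.toList with
      | none => false        -- no numbers found
      | some alphaEnd =>
        let alphaPart := PySem.List.slice reference.toList none (some (alphaEnd : Int))
        if !PySem.Chars.strIsalpha alphaPart then false
        else
          let numericPart := PySem.List.slice reference.toList (some (alphaEnd : Int)) none
          if !PySem.Chars.strIsdigit numericPart then false
          else true

-- ===== PORT B =====
-- the single pass with the seen_digit flag
def pvAltScan : List Char → Bool → Bool
  | [], seen => seen
  | c :: rest, seen =>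
    if PySem.Chars.isdigit c then pvAltScan rest true
    else if PySem.Chars.isalpha c then
      if seen then false else pvAltScan rest seen
    else false

def validate_reference_format_py_alt (reference : String) : Bool :=
  match reference.toList with
  | [] => false
  | c0 :: _ =>
    if !PySem.Chars.isalpha c0 then false
    else pvAltScan reference.toList false

-- ===== PRECONDITION & SPEC =====
def Spec_validate_reference_format_py (reference : String) (out : Bool) : Prop := out = validate_reference_format_py_alt reference
instance (reference : String) (out : Bool) : Decidable (Spec_validate_reference_format_py reference out) := by unfold Spec_validate_reference_format_py; infer_instance

-- ===== CLAIM (what is proved, stated in full; the proofs are below) =====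
def Claim_equal_validate_reference_format_py : Prop := ∀ (reference : String), Dom_validate_reference_format_py reference → Spec_validate_reference_format_py reference (validate_reference_format_py reference)

-- ===== LEMMAS AND PROOFS =====

theorem isdigit_eq_false_of_isalpha (c : Char) (h : PySem.Chars.isalpha c = true) :
    PySem.Chars.isdigit c = false := by
  simp [PySem.Chars.isalpha, PySem.Chars.isupper, PySem.Chars.islower, Char.le_def] at h
  simp [PySem.Chars.isdigit, Char.le_def]
  intro h1
  rcases h with ⟨h2, h3⟩ | ⟨h2, h3⟩ <;>
    simp [UInt32.le_iff_toNat_le, UInt32.lt_iff_toNat_lt] at h1 h2 h3 ⊢ <;> omega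

theorem pvAltScan_true (l : List Char) : pvAltScan l true = l.all PySem.Chars.isdigit := by
  induction l with
  | nil => rfl
  | cons c rest ih =>
    by_cases hd : PySem.Chars.isdigit c = true
    · simp [pvAltScan, hd, ih]
    · by_cases ha : PySem.Chars.isalpha c = true <;>
        simp_all [pvAltScan]

theorem pvAltScan_false (l : List Char) :
    pvAltScan l false =
      match pvFindFirstDigit l with
      | none => false
      | some k => (l.take k).all PySem.Chars.isalpha && (l.drop k).all PySem.Chars.isdigit := by
  induction l with
  | nil => rfl
  | cons c rest ih =>
    by_cases hd : PySem.Chars.isdigit c = true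
    · simp [pvAltScan, pvFindFirstDigit, hd, pvAltScan_true]
    · by_cases ha : PySem.Chars.isalpha c = true
      · simp only [pvAltScan, hd, ha, if_true, ih, pvFindFirstDigit]
        cases h : pvFindFirstDigit rest with
        | none => simp
        | some k => simp [ha, List.take_succ_cons, List.drop_succ_cons]
      · simp only [pvAltScan, hd, ha, Bool.false_eq_true, if_false, pvFindFirstDigit]
        cases h : pvFindFirstDigit rest with
        | none => simp
        | some k => simp [ha]

theorem pvFindFirstDigit_lt (l : List Char) (k : Nat) (h : pvFindFirstDigit l = some k) :
    k < l.length := by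
  induction l generalizing k with
  | nil => simp [pvFindFirstDigit] at h
  | cons c rest ih =>
    by_cases hd : PySem.Chars.isdigit c = true
    · simp [pvFindFirstDigit, hd] at h
      simp [List.length_cons]
      omega
    · simp [pvFindFirstDigit, hd] at h
      obtain ⟨k', hk', rfl⟩ := h
      have := ih k' hk'
      simp
      omega

theorem pvFindFirstDigit_cons_nondigit (c : Char) (rest : List Char)
    (hd : PySem.Chars.isdigit c = false) (k : Nat)
    (h : pvFindFirstDigit (c :: rest) = some k) : 0 < k := by
  simp [pvFindFirstDigit, hd] at h
  obtain ⟨k', _, rfl⟩ := h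
  omega

-- ===== VERDICT (by name: the statement is the Claim_ definition above) =====
theorem validate_reference_format_py_spec : Claim_equal_validate_reference_format_py := by
  intro reference _
  unfold Spec_validate_reference_format_py validate_reference_format_py validate_reference_format_py_alt
  cases hl : reference.toList with
  | nil => rfl
  | cons c0 rest =>
    by_cases ha : PySem.Chars.isalpha c0 = true
    · simp only [ha, Bool.not_true, Bool.false_eq_true, if_false, pvAltScan_false]
      cases h : pvFindFirstDigit (c0 :: rest) with
      | none => rfl
      | some k =>
        have hk0 : 0 < k :=
          pvFindFirstDigit_cons_nondigit c0 rest (isdigit_eq_false_of_isalpha c0 ha) k h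
        have hklt : k < (c0 :: rest).length := pvFindFirstDigit_lt _ k h
        simp only [List.length_cons] at hklt
        have htake : (c0 :: rest).take k ≠ [] := by
          simp [List.take_eq_nil_iff]; omega
        have hdrop : (c0 :: rest).drop k ≠ [] := by
          simp [List.drop_eq_nil_iff]; omega
        simp only [PySem.List.slice_to_natCast, PySem.List.slice_from_natCast,
          PySem.Chars.strIsalpha, PySem.Chars.strIsdigit]
        rw [Bool.eq_iff_iff]
        simp [List.all_eq_true]
        constructor
        · rintro ⟨⟨_, h1⟩, _, h2⟩; exact ⟨h1, h2⟩
        · rintro ⟨h1, h2⟩; exact ⟨⟨by omega, h1⟩, by omega, h2⟩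
    · simp [ha]
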